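-- pv_equiv track=rewrite | github.com/botassembly/jn | jn_home/plugins/protocols/glob_.py | pattern_explicitly_names_hidden
-- ===== SOURCE A (Python) =====
-- def pattern_explicitly_names_hidden(pattern: str) -> bool:
--     """Check if glob pattern explicitly names a hidden directory or file.
--
--     Returns True if pattern starts with '.' (but not './' or '..') or contains
--     '/.' followed by a non-special character, indicating the user explicitly
--     wants to access hidden paths.
--
--     Examples:
--         '.botassembly/**/*.jsonl' -> True (starts with hidden dir)
--         'data/.cache/*.json' -> True (contains hidden subdir)
--         '**/*.jsonl' -> False (no explicit hidden reference)
--         './*.json' -> False (current dir notation, not hidden intent)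
--         '../foo/*.json' -> False (parent dir notation, not hidden intent)
--         '.hidden/*.json' -> True (hidden directory)
--     """
--     # Pattern starts with a dot (hidden file/dir at root)
--     # Exclude './' (current dir) and '..' (parent dir)
--     if pattern.startswith('.') and not pattern.startswith('./') and not pattern.startswith('..'):
--         return True
--
--     # Pattern contains /. followed by something other than / or .
--     # This catches data/.cache but not ./ or ../
--     idx = 0
--     while True:
--         idx = pattern.find('/.', idx)
--         if idx == -1:
--             break
--         # Check what follows /.
--         next_idx = idx + 2
--         if next_idx < len(pattern):
--             next_char = pattern[next_idx]
--             # If next char is not / or ., it's a hidden path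
--             if next_char not in ('/', '.'):
--                 return True
--         idx += 1
--
--     return False
-- ===== SOURCE B (Python) =====
-- def pattern_explicitly_names_hidden(pattern: str) -> bool:
--     # Same first guard as the original; then a split-based scan of path
--     # segments instead of a find('/.') index loop.
--     if pattern.startswith('.') and not pattern.startswith('./') and not pattern.startswith('..'):
--         return True
--     for seg in pattern.split('/')[1:]:
--         if seg.startswith('.') and not seg.startswith('..') and seg != '.':
--             return True
--     return False
-- ===== Notes on version B (the rewrite author's own statement) =====
-- stated objective: idiomatic
-- what changed: Replaces the manual find('/.', idx) index-advancing while-loop by splitting the pattern on '/' and testing each non-first segment for a hidden-name prefix.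
import Mathlib
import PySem

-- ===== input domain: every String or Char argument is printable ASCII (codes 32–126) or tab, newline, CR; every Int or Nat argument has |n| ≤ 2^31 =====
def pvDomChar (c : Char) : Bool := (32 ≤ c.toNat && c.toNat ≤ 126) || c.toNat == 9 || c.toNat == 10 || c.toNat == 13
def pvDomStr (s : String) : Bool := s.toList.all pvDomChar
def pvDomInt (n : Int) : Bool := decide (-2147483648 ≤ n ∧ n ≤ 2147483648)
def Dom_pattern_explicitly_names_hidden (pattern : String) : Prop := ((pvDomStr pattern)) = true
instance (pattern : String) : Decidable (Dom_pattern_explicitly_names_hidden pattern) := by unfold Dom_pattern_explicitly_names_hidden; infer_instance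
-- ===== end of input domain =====

-- B replaces A's find('/.', idx) index loop by splitting on '/' and testing each later segment (idiomatic decomposition; same results).

-- ===== PORT A =====
-- termination fact for the while-loop port: a successful find(sub, idx) implies idx ≤ len(s) and idx ≤ result
theorem pehFindFrom_bound (cs sub : List Char) (k : Nat)
    (h : PySem.Chars.findFrom cs sub (k : Int) none ≠ -1) :
    k ≤ cs.length ∧ (k : Int) ≤ PySem.Chars.findFrom cs sub (k : Int) none := by
  unfold PySem.Chars.findFrom at *
  simp only at h ⊢
  split_ifs at h ⊢ with h1 h2 h3 h4 h5
  all_goals first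
    | omega
    | (exact absurd rfl h)
    | (refine ⟨by omega, ?_⟩
       have := PySem.Chars.neg_one_le_find (List.drop (Int.toNat ↑k) (List.take (Int.toNat (↑cs.length : Int)) cs)) sub
       omega)

-- the 'while True: idx = pattern.find('/.', idx); …' loop of A, verbatim (idx is only ever 0 or a found index + 1, hence a Nat;
-- pattern[next_idx] is in range by the dependent guard h, exactly Python's 'if next_idx < len(pattern)')
def pehLoop (cs : List Char) (idx : Nat) : Bool :=
  if hj : PySem.Chars.findFrom cs ['/', '.'] (idx : Int) none = -1 then false
  else
    if h : (PySem.Chars.findFrom cs ['/', '.'] (idx : Int) none).toNat + 2 < cs.length then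
      if cs[(PySem.Chars.findFrom cs ['/', '.'] (idx : Int) none).toNat + 2] ≠ '/' ∧
          cs[(PySem.Chars.findFrom cs ['/', '.'] (idx : Int) none).toNat + 2] ≠ '.' then true
      else pehLoop cs ((PySem.Chars.findFrom cs ['/', '.'] (idx : Int) none).toNat + 1)
    else pehLoop cs ((PySem.Chars.findFrom cs ['/', '.'] (idx : Int) none).toNat + 1)
termination_by cs.length + 1 - idx
decreasing_by
  all_goals
    have hb := pehFindFrom_bound cs ['/', '.'] idx hj
    omega

def pattern_explicitly_names_hidden (pattern : String) : Bool :=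
  if PySem.Str.startswith pattern "." && !(PySem.Str.startswith pattern "./")
      && !(PySem.Str.startswith pattern "..") then true
  else pehLoop pattern.toList 0

-- ===== PORT B =====
def pattern_explicitly_names_hidden_alt (pattern : String) : Bool :=
  if PySem.Str.startswith pattern "." && !(PySem.Str.startswith pattern "./")
      && !(PySem.Str.startswith pattern "..") then true
  else
    (PySem.Chars.splitOn pattern.toList ['/']).tail.any (fun seg =>
      PySem.Chars.startswith seg ['.'] && !(PySem.Chars.startswith seg ['.', '.'])
        && !(seg == ['.']))

-- ===== PRECONDITION & SPEC =====
def Spec_pattern_explicitly_names_hidden (pattern : String) (out : Bool) : Prop := out = pattern_explicitly_names_hidden_alt pattern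
instance (pattern : String) (out : Bool) : Decidable (Spec_pattern_explicitly_names_hidden pattern out) := by unfold Spec_pattern_explicitly_names_hidden; infer_instance

-- ===== CLAIM (what is proved, stated in full; the proofs are below) =====
def Claim_equal_pattern_explicitly_names_hidden : Prop := ∀ (pattern : String), Dom_pattern_explicitly_names_hidden pattern → Spec_pattern_explicitly_names_hidden pattern (pattern_explicitly_names_hidden pattern)

-- ===== LEMMAS AND PROOFS =====

-- an occurrence of '/.' at position i followed by a character other than '/' and '.'
def pehP (cs : List Char) (i : Nat) : Prop :=
  cs[i]? = some '/' ∧ cs[i + 1]? = some '.' ∧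
    ∃ d, cs[i + 2]? = some d ∧ d ≠ '/' ∧ d ≠ '.'

def pehE (cs : List Char) : Prop := ∃ i, pehP cs i

theorem peh_pref2_gen (l : List Char) :
    ['/', '.'] <+: l ↔ (l[0]? = some '/' ∧ l[1]? = some '.') := by
  match l with
  | [] => simp
  | [a] => simp [List.cons_prefix_iff]
  | a :: b :: t => simp [List.cons_prefix_iff, eq_comm]
theorem peh_pref2_iff (cs : List Char) (i : Nat) :
    ['/', '.'] <+: cs.drop i ↔ (cs[i]? = some '/' ∧ cs[i + 1]? = some '.') := by
  rw [peh_pref2_gen, List.getElem?_drop, List.getElem?_drop]; simp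

theorem pehLoop_iff (cs : List Char) (idx : Nat) (hle : idx ≤ cs.length) :
    pehLoop cs idx = true ↔ ∃ i, idx ≤ i ∧ pehP cs i := by
  induction idx using pehLoop.induct cs with
  | case1 x hj =>
    rw [pehLoop, dif_pos hj]
    simp only [Bool.false_eq_true, false_iff]
    rintro ⟨i, hxi, hP1, hP2, _⟩
    have hpref : ['/', '.'] <+: cs.drop i := (peh_pref2_iff cs i).mpr ⟨hP1, hP2⟩
    have hnin := (PySem.Chars.findFrom_natCast_eq_neg_one_iff cs ['/', '.'] x hle).mp hj
    apply hnin
    rw [← PySem.Chars.isIn_iff_infix, ← PySem.Chars.exists_prefix_drop_iff_isIn]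
    refine ⟨i - x, ?_⟩
    rwa [List.drop_drop, Nat.add_sub_cancel' hxi]
  | case2 x hj hlt hcc =>
    rw [pehLoop, dif_neg hj, dif_pos hlt, if_pos hcc]
    simp only [true_iff]
    have hspec := PySem.Chars.findFrom_natCast_spec cs ['/', '.'] x hle hj
    set j := (PySem.Chars.findFrom cs ['/', '.'] ↑x).toNat with hjdef
    obtain ⟨hx, hpref, _⟩ := hspec
    have h2 := (peh_pref2_iff cs j).mp hpref
    exact ⟨j, by omega, h2.1, h2.2, cs[j + 2]'hlt, (List.getElem?_eq_getElem hlt).symm ▸ rfl, hcc.1, hcc.2⟩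
  | case3 x hj hlt hcc ih =>
    rw [pehLoop, dif_neg hj, dif_pos hlt, if_neg hcc]
    have hspec := PySem.Chars.findFrom_natCast_spec cs ['/', '.'] x hle hj
    set j := (PySem.Chars.findFrom cs ['/', '.'] ↑x).toNat with hjdef
    obtain ⟨hx, hpref, hmin⟩ := hspec
    rw [ih (by omega)]
    constructor
    · rintro ⟨i, hi, hP⟩; exact ⟨i, by omega, hP⟩
    · rintro ⟨i, hi, hP⟩
      refine ⟨i, ?_, hP⟩
      by_contra hnge
      rcases Nat.lt_or_ge i j with hij | hij
      · exact hmin i hi hij ((peh_pref2_iff cs i).mpr ⟨hP.1, hP.2.1⟩)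
      · have : i = j := by omega
        subst this
        obtain ⟨d, hd, hd1, hd2⟩ := hP.2.2
        rw [List.getElem?_eq_getElem hlt] at hd
        exact hcc ⟨by simpa [← Option.some_inj.mp hd] using hd1, by simpa [← Option.some_inj.mp hd] using hd2⟩
  | case4 x hj hlt ih =>
    rw [pehLoop, dif_neg hj, dif_neg hlt]
    have hspec := PySem.Chars.findFrom_natCast_spec cs ['/', '.'] x hle hj
    set j := (PySem.Chars.findFrom cs ['/', '.'] ↑x).toNat with hjdef
    obtain ⟨hx, hpref, hmin⟩ := hspec
    have hlen2 : j + 2 ≤ cs.length := by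
      have := hpref.length_le
      simp [List.length_drop] at this
      omega
    rw [ih (by omega)]
    constructor
    · rintro ⟨i, hi, hP⟩; exact ⟨i, by omega, hP⟩
    · rintro ⟨i, hi, hP⟩
      refine ⟨i, ?_, hP⟩
      by_contra hnge
      rcases Nat.lt_or_ge i j with hij | hij
      · exact hmin i hi hij ((peh_pref2_iff cs i).mpr ⟨hP.1, hP.2.1⟩)
      · have : i = j := by omega
        subst this
        obtain ⟨d, hd, _, _⟩ := hP.2.2
        rw [List.getElem?_eq_none (by omega)] at hd
        simp at hd

-- B side: a simple recursive split on '/', the shape the proofs recurse over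
def mySplit : List Char → List (List Char)
  | [] => [[]]
  | c :: t =>
    if c = '/' then [] :: mySplit t
    else
      match mySplit t with
      | s :: ss => (c :: s) :: ss
      | [] => [[c]]
theorem mySplit_ne_nil (cs : List Char) : mySplit cs ≠ [] := by
  cases cs with
  | nil => simp [mySplit]
  | cons c t =>
    simp only [mySplit]
    split
    · simp
    · split <;> simp
theorem peh_splitOn_go (fuel : Nat) :
    ∀ (l cur : List Char) (acc : List (List Char)), l.length < fuel →
      PySem.Chars.splitOn.go ['/'] fuel l cur acc =
        acc.reverse ++ (match mySplit l with
          | s :: ss => (cur.reverse ++ s) :: ss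
          | [] => [cur.reverse]) := by
  induction fuel with
  | zero => intro l cur acc h; omega
  | succ f ih =>
    intro l cur acc h
    cases l with
    | nil =>
      rw [PySem.Chars.splitOn.go]
      simp [mySplit]
      omega
    | cons c t =>
      rw [PySem.Chars.splitOn.go]
      by_cases hc : c = '/'
      · subst hc
        have hp : List.isPrefixOf ['/'] ('/' :: t) = true := by simp [List.isPrefixOf]
        simp only [hp, if_true, List.length_cons, List.length_nil, Nat.zero_add,
          List.drop_succ_cons, List.drop_zero]
        rw [ih t [] ((List.reverse cur) :: _) (by simp at h ⊢; omega)]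
        simp only [mySplit, reduceIte]
        cases hms : mySplit t with
        | nil => exact absurd hms (mySplit_ne_nil t)
        | cons s ss => simp
      · have hp : List.isPrefixOf ['/'] (c :: t) = false := by
          simp [List.isPrefixOf]; exact fun hh => absurd hh.symm hc
        simp only [hp]
        rw [if_neg (by simp)]
        rw [ih t (c :: cur) acc (by simp at h ⊢; omega)]
        simp only [mySplit, if_neg hc]
        cases hms : mySplit t with
        | nil => exact absurd hms (mySplit_ne_nil t)
        | cons s ss => simp
theorem peh_splitOn_eq (cs : List Char) :
    PySem.Chars.splitOn cs ['/'] = mySplit cs := by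
  unfold PySem.Chars.splitOn
  rw [peh_splitOn_go (cs.length + 1) cs [] [] (by omega)]
  cases hms : mySplit cs with
  | nil => exact absurd hms (mySplit_ne_nil cs)
  | cons s ss => simp

-- the string starts '.', then a character other than '/' and '.' (a hidden-naming segment head)
def pehHM (cs : List Char) : Prop := ∃ d t, cs = '.' :: d :: t ∧ d ≠ '/' ∧ d ≠ '.'

theorem pehHM_iff (t : List Char) :
    pehHM t ↔ (t[0]? = some '.' ∧ ∃ d, t[1]? = some d ∧ d ≠ '/' ∧ d ≠ '.') := by
  match t with
  | [] => simp [pehHM]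
  | [a] => simp [pehHM]
  | a :: b :: r => simp [pehHM]

theorem pehE_cons (c : Char) (t : List Char) :
    pehE (c :: t) ↔ (c = '/' ∧ pehHM t) ∨ pehE t := by
  constructor
  · rintro ⟨i, hP⟩
    cases i with
    | zero =>
      left
      obtain ⟨h0, h1, d, h2, hd⟩ := hP
      simp at h0
      exact ⟨h0, (pehHM_iff t).mpr ⟨by simpa using h1, d, by simpa using h2, hd⟩⟩
    | succ n =>
      right
      obtain ⟨h0, h1, d, h2, hd1, hd2⟩ := hP
      exact ⟨n, by simpa using h0, by simpa using h1, d, by simpa using h2, hd1, hd2⟩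
  · rintro (⟨hc, hm⟩ | ⟨n, h0, h1, d, h2, hd⟩)
    · obtain ⟨h0, d, h1, hd1, hd2⟩ := (pehHM_iff t).mp hm
      exact ⟨0, by simpa using hc, by simpa using h0, d, by simpa using h1, hd1, hd2⟩
    · exact ⟨n + 1, by simpa using h0, by simpa using h1, d, by simpa using h2, hd⟩

theorem mySplit_slash (t : List Char) : mySplit ('/' :: t) = [] :: mySplit t := by
  simp [mySplit]

theorem mySplit_cons_ne (c : Char) (t s : List Char) (ss : List (List Char))
    (hc : c ≠ '/') (hms : mySplit t = s :: ss) : mySplit (c :: t) = (c :: s) :: ss := by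
  simp [mySplit, hc, hms]

theorem pehSegPred_head (t : List Char) :
    ((fun seg => PySem.Chars.startswith seg ['.'] && !(PySem.Chars.startswith seg ['.', '.'])
        && !(seg == ['.'])) ((mySplit t).headI) = true) ↔ pehHM t := by
  rw [pehHM_iff]
  match t with
  | [] => simp [mySplit, PySem.Chars.startswith]
  | '/' :: r =>
    rw [mySplit_slash]
    simp [PySem.Chars.startswith]
  | c :: r =>
    by_cases hc : c = '/'
    · subst hc
      rw [mySplit_slash]
      simp [PySem.Chars.startswith]
    · match r with
      | [] =>
        rw [mySplit_cons_ne c [] [] [] hc rfl]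
        simp [PySem.Chars.startswith, List.isPrefixOf]
        aesop
      | '/' :: r' =>
        obtain ⟨s, ss, hms⟩ : ∃ s ss, mySplit ('/' :: r') = s :: ss := by
          rw [mySplit_slash]; exact ⟨[], mySplit r', rfl⟩
        rw [mySplit_cons_ne c _ s ss hc hms]
        rw [mySplit_slash] at hms
        obtain ⟨rfl, rfl⟩ : s = [] ∧ ss = mySplit r' := by
          injection hms with h1 h2; exact ⟨h1.symm, h2.symm⟩
        simp [PySem.Chars.startswith, List.isPrefixOf]
        aesop
      | d :: r' =>
        by_cases hd : d = '/'
        · subst hd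
          obtain ⟨s, ss, hms⟩ : ∃ s ss, mySplit ('/' :: r') = s :: ss := by
            rw [mySplit_slash]; exact ⟨[], mySplit r', rfl⟩
          rw [mySplit_cons_ne c _ s ss hc hms]
          rw [mySplit_slash] at hms
          obtain ⟨rfl, rfl⟩ : s = [] ∧ ss = mySplit r' := by
            injection hms with h1 h2; exact ⟨h1.symm, h2.symm⟩
          simp [PySem.Chars.startswith, List.isPrefixOf]
          aesop
        · obtain ⟨s, ss, hms'⟩ : ∃ s ss, mySplit r' = s :: ss := by
            cases hx : mySplit r' with
            | nil => exact absurd hx (mySplit_ne_nil r')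
            | cons a b => exact ⟨a, b, rfl⟩
          rw [mySplit_cons_ne c _ _ _ hc (mySplit_cons_ne d r' s ss hd hms')]
          simp [PySem.Chars.startswith, List.isPrefixOf, hd]
          aesop

theorem pehAny_iff (cs : List Char) :
    ((mySplit cs).tail.any (fun seg =>
      PySem.Chars.startswith seg ['.'] && !(PySem.Chars.startswith seg ['.', '.'])
        && !(seg == ['.'])) = true) ↔ pehE cs := by
  induction cs with
  | nil => simp [mySplit, pehE, pehP]
  | cons c t ih =>
    rw [pehE_cons]
    obtain ⟨s, ss, hms⟩ : ∃ s ss, mySplit t = s :: ss := by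
      cases hx : mySplit t with
      | nil => exact absurd hx (mySplit_ne_nil t)
      | cons a b => exact ⟨a, b, rfl⟩
    by_cases hc : c = '/'
    · subst hc
      rw [mySplit_slash, List.tail_cons, hms, List.any_cons]
      have hh := pehSegPred_head t
      rw [hms] at hh
      simp only [List.headI] at hh
      rw [hms, List.tail_cons] at ih
      simp only [Bool.or_eq_true, hh, ih]
      tauto
    · rw [mySplit_cons_ne c t s ss hc hms, List.tail_cons]
      rw [hms, List.tail_cons] at ih
      rw [ih]
      simp [hc]

-- ===== VERDICT (by name: the statement is the Claim_ definition above) =====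
theorem pattern_explicitly_names_hidden_spec : Claim_equal_pattern_explicitly_names_hidden := by
  intro pattern _
  unfold Spec_pattern_explicitly_names_hidden
  unfold pattern_explicitly_names_hidden pattern_explicitly_names_hidden_alt
  split
  · rfl
  · rw [peh_splitOn_eq]
    have h1 := pehLoop_iff pattern.toList 0 (Nat.zero_le _)
    have h2 := pehAny_iff pattern.toList
    rw [Bool.eq_iff_iff, h1, h2]
    unfold pehE
    simp
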